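-- pv_equiv track=rewrite | github.com/Ignisolver/Python-scripts | topsis/topsis_2.py | is_niepor
-- ===== SOURCE A (Python) =====
-- from copy import deepcopy
--
-- def is_domi(x, y):
--     """
--     funkcja sprawdzająca czy dany punkt dominuje drugi
--     :param x: pkt 1
--     :param y: pkt 2
--     :return: x,y - większy, None - nieporównywalne, Err - takie same
--     """
--     gr = [None] * 3
--     eq = deepcopy(gr)
--     sm = deepcopy(gr)
--
--     for i in range(len(x)):
--         gr[i] = (x[i] >= y[i])
--         eq[i] = (x[i] == y[i])
--         sm[i] = (x[i] <= y[i])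
--     if all(eq):
--         raise ValueError(f"the same error {x}")  # dwa takie same punkty
--     if all(gr):
--         return x  # punkt x większy
--     elif all(sm):
--         return y  # punkt y większy
--     else:
--         return None  # punkty nieporównywalne
--
-- def is_niepor(b):
--     """
--     funkcja zwraca punktu nieporównywalne z danego zbioru
--     :param b: zbiór
--     """
--     niepor = dict()
--     for pkt in b:
--         for pkt2 in b:
--             if b[pkt] != b[pkt2]:
--                 res = is_domi(b[pkt], b[pkt2])
--                 if res:
--                     break
--         else:
--             niepor.update({pkt: b[pkt]})
--     return niepor
-- ===== SOURCE B (Python) =====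
-- def is_niepor(b):
--     """Pareto-incomparable points of a set of 3-criteria points.
--
--     Sort the distinct points lexicographically and do two frontier sweeps:
--     ascending, a point dominated componentwise is dominated by some point
--     already on the minima frontier; descending, symmetrically for the maxima
--     frontier.  A point is incomparable iff neither sweep marks it.
--     """
--     def below(q, p):
--         q1, q2, q3 = q
--         p1, p2, p3 = p
--         return q1 <= p1 and q2 <= p2 and q3 <= p3
--
--     def marked(pts, rel):
--         hit = set()
--         frontier = []
--         for p in pts:
--             if any(rel(q, p) for q in frontier):
--                 hit.add(p)
--             else:
--                 frontier.append(p)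
--         return hit
--
--     pts = sorted({tuple(v) for v in b.values()})
--     has_below = marked(pts, below)
--     has_above = marked(list(reversed(pts)), lambda q, p: below(p, q))
--     return {k: v for k, v in b.items()
--             if tuple(v) not in has_below and tuple(v) not in has_above}
-- ===== Notes on version B (the rewrite author's own statement) =====
-- stated objective: alternative
-- what changed: A's nested all-pairs dict scan with a per-pair is_domi helper is replaced by sorting the distinct points lexicographically and running two Pareto-frontier sweeps (ascending marks points dominated from below, descending marks points dominated from above), then one filter of the items; Pre_ excludes dicts holding two distinct points that are not both 3-dimensional, where A raises IndexError or answers through its fixed 3-slot scratch lists while B's 3-criteria unpacking raises ValueError.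
-- outside the precondition, e.g. on is_niepor({0: [1], 1: [2]}): A returns {0: [1], 1: [2]}, B raises ValueError
import Mathlib
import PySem

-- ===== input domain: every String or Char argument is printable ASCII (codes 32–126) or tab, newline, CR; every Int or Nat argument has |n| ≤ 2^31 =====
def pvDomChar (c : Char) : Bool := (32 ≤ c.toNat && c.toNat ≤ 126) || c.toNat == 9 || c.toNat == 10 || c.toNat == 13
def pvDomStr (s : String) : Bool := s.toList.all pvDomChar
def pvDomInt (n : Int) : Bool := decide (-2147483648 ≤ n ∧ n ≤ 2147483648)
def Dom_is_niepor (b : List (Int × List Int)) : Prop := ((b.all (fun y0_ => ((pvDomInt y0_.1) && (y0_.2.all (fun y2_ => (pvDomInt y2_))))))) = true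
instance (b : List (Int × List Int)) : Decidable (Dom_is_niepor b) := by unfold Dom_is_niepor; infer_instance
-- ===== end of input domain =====

-- B replaces A's nested all-pairs dict scan (per-pair is_domi with [None]*3 scratch lists,
-- break/else) by sorting the distinct points and running two lexicographic Pareto-frontier
-- sweeps; objective: alternative algorithm, same exact result on Pre_.


-- ===== PORT A =====
-- is_domi: outer none = exception (IndexError/ValueError), inner value = Python return (None or a point)
def is_domi (x y : List Int) : Option (Option (List Int)) :=
  let gr : List (Option Bool) := [none, none, none]
  let eq : List (Option Bool) := gr
  let sm : List (Option Bool) := gr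
  let st := (PySem.List.pyRange 0 (PySem.List.len x) 1).foldl
    (fun acc i =>
      match acc with
      | none => none
      | some (gr, eq, sm) =>
        match PySem.List.pyGet? x i, PySem.List.pyGet? y i with
        | some xi, some yi =>
          match PySem.List.pySet? gr i (some (decide (xi ≥ yi))),
                PySem.List.pySet? eq i (some (decide (xi = yi))),
                PySem.List.pySet? sm i (some (decide (xi ≤ yi))) with
          | some gr', some eq', some sm' => some (gr', eq', sm')
          | _, _, _ => none
        | _, _ => none)
    (some (gr, eq, sm))
  match st with
  | none => none
  | some (gr, eq, sm) =>
    if eq.all (fun ob => ob.getD false) then none           -- raise ValueError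
    else if gr.all (fun ob => ob.getD false) then some (some x)
    else if sm.all (fun ob => ob.getD false) then some (some y)
    else some none

-- `if res:` truthiness of is_domi's Python return value (None falsy, a list truthy iff nonempty)
def pyTruthyRes (r : Option (List Int)) : Bool := !(r.getD []).isEmpty

-- the inner `for pkt2 in b: … break / else` loop: none = exception, some true = broke, some false = fell through
def is_niepor_inner (b : List (Int × List Int)) (v : List Int) (keys : List Int) : Option Bool :=
  keys.foldl
    (fun st k2 =>
      match st with
      | none => none
      | some true => some true
      | some false =>
        match (PySem.Dict.mk b).get? k2 with
        | none => none
        | some w =>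
          if v ≠ w then
            match is_domi v w with
            | none => none
            | some res => some (pyTruthyRes res)
          else some false)
    (some false)

-- one outer-loop iteration: process key k (none = exception propagates)
def is_niepor_step (b : List (Int × List Int)) (acc : Option (PySem.Dict Int (List Int))) (k : Int) :
    Option (PySem.Dict Int (List Int)) :=
  match acc with
  | none => none
  | some nie =>
    match (PySem.Dict.mk b).get? k with
    | none => none
    | some v =>
      match is_niepor_inner b v (b.map Prod.fst) with
      | none => none
      | some true => some nie
      | some false => some (nie.insert k v)

def is_niepor (b : List (Int × List Int)) : List (Int × List Int) :=
  let keys := b.map Prod.fst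
  let r := keys.foldl (is_niepor_step b) (some PySem.Dict.empty)
  (r.getD PySem.Dict.empty).items

-- ===== PORT B =====
-- below q p = "q is componentwise ≤ p" for 3-criteria points; the catch-all branch is where
-- Python's tuple unpacking raises ValueError (those inputs are excluded by Pre_)
def below (q p : List Int) : Bool :=
  match q, p with
  | [q1, q2, q3], [p1, p2, p3] => decide (q1 ≤ p1) && decide (q2 ≤ p2) && decide (q3 ≤ p3)
  | _, _ => false

-- one step of a frontier sweep: state = (marked set, frontier)
def pvStep (rel : List Int → List Int → Bool)
    (st : PySem.Set (List Int) × List (List Int)) (p : List Int) :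
    PySem.Set (List Int) × List (List Int) :=
  if st.2.any (fun q => rel q p) then (PySem.Set.add st.1 p, st.2) else (st.1, st.2 ++ [p])

-- the `marked` helper of Source B
def pvMarked (pts : List (List Int)) (rel : List Int → List Int → Bool) : PySem.Set (List Int) :=
  (pts.foldl (pvStep rel) (PySem.Set.empty, [])).1

def is_niepor_alt (b : List (Int × List Int)) : List (Int × List Int) :=
  -- sorted({tuple(v) for v in b.values()}): Python's lexicographic tuple order
  let pts := PySem.List.sorted (PySem.Set.ofList (b.map Prod.snd)) (fun x => x) false
  let hasBelow := pvMarked pts below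
  let hasAbove := pvMarked pts.reverse (fun q p => below p q)
  b.filter (fun kv => !(PySem.Set.contains hasBelow kv.2) && !(PySem.Set.contains hasAbove kv.2))

-- ===== PRECONDITION & SPEC =====
-- Pre_ excludes dicts holding two distinct points that are not both 3-dimensional: on every such
-- input B's 3-criteria tuple unpacking raises ValueError (while A raises IndexError on points
-- longer than 3 and otherwise answers through its fixed 3-slot scratch lists).  The keys-Nodup
-- conjunct excludes nothing a Python dict can present (dict keys are unique); it pins the
-- association-list representation.
def Pre_is_niepor (b : List (Int × List Int)) : Prop :=
  (b.map Prod.fst).Nodup ∧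
  ∀ v ∈ b.map Prod.snd, ∀ w ∈ b.map Prod.snd, v ≠ w → v.length = 3 ∧ w.length = 3
instance (b : List (Int × List Int)) : Decidable (Pre_is_niepor b) := by unfold Pre_is_niepor; infer_instance
def pvWitness_is_niepor : (List (Int × List Int)) := [(0, [1, 2, 3]), (1, [2, 1, 3]), (2, [5, 5, 5])]
def Spec_is_niepor (b : List (Int × List Int)) (out : List (Int × List Int)) : Prop := out = is_niepor_alt b
instance (b : List (Int × List Int)) (out : List (Int × List Int)) : Decidable (Spec_is_niepor b out) := by unfold Spec_is_niepor; infer_instance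

-- ===== CLAIM (what is proved, stated in full; the proofs are below) =====
def Claim_equal_is_niepor : Prop := ∀ (b : List (Int × List Int)), Dom_is_niepor b → Pre_is_niepor b → Spec_is_niepor b (is_niepor b)

-- ===== LEMMAS AND PROOFS =====

-- the predicate both programs compute per point: v is comparable with some other distinct value
def pvCmp (v w : List Int) : Bool := below w v || below v w
def pvAnyCmp (vals : List (List Int)) (v : List Int) : Bool :=
  vals.any (fun w => w ≠ v && pvCmp v w)

-- on distinct 3-dimensional points is_domi returns (no exception) and its truthiness is pvCmp
theorem domi_char (v w : List Int) (hne : v ≠ w) (hv : v.length = 3) (hw : w.length = 3) :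
    ∃ r, is_domi v w = some r ∧ pyTruthyRes r = pvCmp v w := by
  match v, w with
  | [a1, a2, a3], [b1, b2, b3] =>
    have hne' : ¬(a1 = b1 ∧ a2 = b2 ∧ a3 = b3) := by
      rintro ⟨rfl, rfl, rfl⟩; exact hne rfl
    refine ⟨if (decide (a1 ≥ b1) && decide (a2 ≥ b2) && decide (a3 ≥ b3)) then some [a1,a2,a3]
            else if (decide (a1 ≤ b1) && decide (a2 ≤ b2) && decide (a3 ≤ b3)) then some [b1,b2,b3]
            else none, ?_, ?_⟩ <;>
      simp [is_domi, pyTruthyRes, pvCmp, below, PySem.List.len_eq, PySem.List.pyRange,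
        List.range_succ, PySem.List.pyGet?, PySem.List.pyIdx?, PySem.List.pySet?] <;>
      split_ifs <;> simp_all <;> omega
  | [], w => simp at hv
  | [_], w => simp at hv
  | [_, _], w => simp at hv
  | _ :: _ :: _ :: _ :: _, w => simp at hv
  | [_, _, _], [] => simp at hw
  | [_, _, _], [_] => simp at hw
  | [_, _, _], [_, _] => simp at hw
  | [_, _, _], _ :: _ :: _ :: _ :: _ => simp at hw

-- once the inner loop has broken, it stays broken
theorem inner_absorb (b : List (Int × List Int)) (v : List Int) (ks : List Int) :
    ks.foldl
      (fun st k2 =>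
        match st with
        | none => none
        | some true => some true
        | some false =>
          match (PySem.Dict.mk b).get? k2 with
          | none => none
          | some w =>
            if v ≠ w then
              match is_domi v w with
              | none => none
              | some res => some (pyTruthyRes res)
            else some false)
      (some true) = some true := by
  induction ks with
  | nil => rfl
  | cons k ks ih => exact ih

-- the inner break/else loop computes "comparable with some other value" over the dict's values
theorem inner_eq (b : List (Int × List Int)) (v : List Int) (vals : List (List Int)) (ks : List Int)
    (hv : v ∈ vals)
    (hP : ∀ x ∈ vals, ∀ y ∈ vals, x ≠ y → x.length = 3 ∧ y.length = 3)
    (hk : ∀ k2 ∈ ks, ∃ w, (PySem.Dict.mk b).get? k2 = some w ∧ w ∈ vals) :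
    is_niepor_inner b v ks =
      some (ks.any (fun k2 =>
        match (PySem.Dict.mk b).get? k2 with
        | some w => w ≠ v && pvCmp v w
        | none => false)) := by
  unfold is_niepor_inner
  induction ks with
  | nil => rfl
  | cons k ks ih =>
    obtain ⟨w, hw, hwv⟩ := hk k (by simp)
    simp only [List.foldl_cons, List.any_cons, hw]
    by_cases hvw : v = w
    · rw [if_neg (by simp [hvw])]
      have h2 : (w ≠ v && pvCmp v w) = false := by simp [hvw]
      rw [h2, Bool.false_or]
      exact ih (fun k2 h => hk k2 (by simp [h]))
    · obtain ⟨hl, hle⟩ := hP v hv w hwv hvw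
      obtain ⟨r, hr, htr⟩ := domi_char v w hvw hl hle
      simp only [if_pos hvw, hr, htr]
      by_cases hc : pvCmp v w = true
      · have hd : (decide (w ≠ v)) = true := by simp [Ne.symm hvw]
        simp only [hc, hd, Bool.true_and, Bool.true_or]
        exact inner_absorb b v ks
      · have hc0 : pvCmp v w = false := by simpa using hc
        simp only [hc0, Bool.and_false, Bool.false_or]
        exact ih (fun k2 h => hk k2 (by simp [h]))

-- first-match lookup in a dict with distinct keys finds each stored pair
theorem lookup_mem (b : List (Int × List Int)) (hnd : (b.map Prod.fst).Nodup)
    {k : Int} {v : List Int} (h : (k, v) ∈ b) : (PySem.Dict.mk b).get? k = some v := by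
  exact PySem.Dict.get?_of_mem_items _ h (by simpa [PySem.Dict.keys_mk] using hnd)

-- the inner any over the key list is pvAnyCmp over the value list
theorem any_keys_eq (b : List (Int × List Int)) (hnd : (b.map Prod.fst).Nodup) (v : List Int) :
    ((b.map Prod.fst).any (fun k2 =>
      match (PySem.Dict.mk b).get? k2 with
      | some w => w ≠ v && pvCmp v w
      | none => false)) = pvAnyCmp (b.map Prod.snd) v := by
  unfold pvAnyCmp
  rw [Bool.eq_iff_iff]
  simp only [List.any_eq_true]
  constructor
  · rintro ⟨k2, hk2, hq⟩
    obtain ⟨⟨k', w⟩, hmem, hfst⟩ := List.mem_map.mp hk2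
    subst hfst
    rw [lookup_mem b hnd hmem] at hq
    exact ⟨w, List.mem_map.mpr ⟨(k', w), hmem, rfl⟩, hq⟩
  · rintro ⟨w, hw, hq⟩
    obtain ⟨⟨k', w'⟩, hmem, hsnd⟩ := List.mem_map.mp hw
    subst hsnd
    refine ⟨k', List.mem_map.mpr ⟨(k', w'), hmem, rfl⟩, ?_⟩
    rw [lookup_mem b hnd hmem]
    exact hq

-- the outer loop accumulates exactly the keys whose value is comparable with no other value
theorem outer_general (b : List (Int × List Int)) (ks : List Int)
    (acc : PySem.Dict Int (List Int))
    (hnd : (b.map Prod.fst).Nodup)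
    (hP : ∀ x ∈ b.map Prod.snd, ∀ y ∈ b.map Prod.snd, x ≠ y → x.length = 3 ∧ y.length = 3)
    (hks : ∀ k ∈ ks, ∃ v, (k, v) ∈ b)
    (hksnd : ks.Nodup)
    (hacc : acc.keys.Nodup)
    (hdisj : ∀ k ∈ ks, acc.contains k = false) :
    ∃ res,
      ks.foldl (is_niepor_step b) (some acc) = some res ∧
      res.items = acc.items ++
        (ks.filter (fun k => !(pvAnyCmp (b.map Prod.snd) (((PySem.Dict.mk b).get? k).getD [])))).map
          (fun k => (k, ((PySem.Dict.mk b).get? k).getD [])) := by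
  induction ks generalizing acc with
  | nil => exact ⟨acc, rfl, by simp⟩
  | cons k ks ih =>
    obtain ⟨v, hv⟩ := hks k (by simp)
    have hget : (PySem.Dict.mk b).get? k = some v := lookup_mem b hnd hv
    have hvmem : v ∈ b.map Prod.snd := List.mem_map.mpr ⟨(k, v), hv, rfl⟩
    have hkeys : ∀ k2 ∈ b.map Prod.fst, ∃ w, (PySem.Dict.mk b).get? k2 = some w ∧ w ∈ b.map Prod.snd := by
      intro k2 hk2
      obtain ⟨⟨k', w⟩, hmem, hfst⟩ := List.mem_map.mp hk2
      subst hfst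
      exact ⟨w, lookup_mem b hnd hmem, List.mem_map.mpr ⟨(k', w), hmem, rfl⟩⟩
    have hinner := inner_eq b v (b.map Prod.snd) (b.map Prod.fst) hvmem hP hkeys
    rw [any_keys_eq b hnd v] at hinner
    have hstep : is_niepor_step b (some acc) k =
        (if pvAnyCmp (b.map Prod.snd) v then some acc else some (acc.insert k v)) := by
      cases hb : pvAnyCmp (b.map Prod.snd) v <;>
        simp [is_niepor_step, hget, hinner, hb]
    have hkne : k ∉ ks := (List.nodup_cons.mp hksnd).1
    have hksnd' : ks.Nodup := (List.nodup_cons.mp hksnd).2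
    rw [List.foldl_cons, hstep]
    by_cases hb : pvAnyCmp (b.map Prod.snd) v = true
    · rw [if_pos hb]
      obtain ⟨res, hres, hitems⟩ :=
        ih acc (fun k2 h => hks k2 (by simp [h])) hksnd' hacc (fun k2 h => hdisj k2 (by simp [h]))
      refine ⟨res, hres, ?_⟩
      rw [hitems, List.filter_cons]
      simp [hget, hb]
    · have hb' : pvAnyCmp (b.map Prod.snd) v = false := by simpa using hb
      rw [if_neg (by simp [hb'])]
      have hcont : acc.contains k = false := hdisj k (by simp)
      have hacc' : (acc.insert k v).keys.Nodup := PySem.Dict.nodup_keys_insert acc k v hacc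
      have hdisj' : ∀ k2 ∈ ks, (acc.insert k v).contains k2 = false := by
        intro k2 h
        rw [PySem.Dict.contains_insert]
        have : (k2 == k) = false := by
          simp only [beq_eq_false_iff_ne, ne_eq]
          rintro rfl; exact hkne h
        rw [this, Bool.false_or]
        exact hdisj k2 (by simp [h])
      obtain ⟨res, hres, hitems⟩ :=
        ih (acc.insert k v) (fun k2 h => hks k2 (by simp [h])) hksnd' hacc' hdisj'
      refine ⟨res, hres, ?_⟩
      rw [hitems, PySem.Dict.items_insert_of_not_contains acc v hcont, List.filter_cons]
      simp [hget, hb', List.append_assoc]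

-- turning the key-indexed filter back into a filter of the item list
theorem assoc_filter (l : List (Int × List Int)) (f : Int → List Int) (p : List Int → Bool)
    (h : ∀ kv ∈ l, f kv.1 = kv.2) :
    ((l.map Prod.fst).filter (fun k => p (f k))).map (fun k => (k, f k)) =
      l.filter (fun kv => p kv.2) := by
  induction l with
  | nil => rfl
  | cons kv l ih =>
    have hf : f kv.1 = kv.2 := h kv (by simp)
    have ih' := ih (fun kv' h' => h kv' (by simp [h']))
    cases hp : p kv.2 <;>
      simp [hf, hp, ih', Prod.mk.eta]

-- A computes the filter of the item list by "comparable with no other value"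
theorem a_eq (b : List (Int × List Int)) (hnd : (b.map Prod.fst).Nodup)
    (hP : ∀ x ∈ b.map Prod.snd, ∀ y ∈ b.map Prod.snd, x ≠ y → x.length = 3 ∧ y.length = 3) :
    is_niepor b = b.filter (fun kv => !(pvAnyCmp (b.map Prod.snd) kv.2)) := by
  obtain ⟨res, hres, hitems⟩ :=
    outer_general b (b.map Prod.fst) PySem.Dict.empty hnd hP
      (fun k hk => by
        obtain ⟨⟨k', v⟩, hm, he⟩ := List.mem_map.mp hk
        exact ⟨v, he ▸ hm⟩)
      hnd PySem.Dict.nodup_keys_empty (fun k _ => PySem.Dict.contains_empty k)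
  show (((b.map Prod.fst).foldl (is_niepor_step b) (some PySem.Dict.empty)).getD
      PySem.Dict.empty).items = _
  rw [hres]
  simp only [Option.getD_some]
  rw [hitems]
  have hemp : (PySem.Dict.empty : PySem.Dict Int (List Int)).items = [] := rfl
  rw [hemp, List.nil_append]
  exact assoc_filter b (fun k => ((PySem.Dict.mk b).get? k).getD [])
    (fun v => !(pvAnyCmp (b.map Prod.snd) v))
    (fun kv hkv => by
      have h := lookup_mem b hnd (show (kv.1, kv.2) ∈ b by simpa using hkv)
      simp [h])

-- ===== B-side lemmas =====

-- below holds exactly of componentwise-ordered 3-dimensional points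
theorem below_iff (q p : List Int) :
    below q p = true ↔ ∃ q1 q2 q3 p1 p2 p3 : Int,
      q = [q1, q2, q3] ∧ p = [p1, p2, p3] ∧ q1 ≤ p1 ∧ q2 ≤ p2 ∧ q3 ≤ p3 := by
  match q, p with
  | [q1, q2, q3], [p1, p2, p3] =>
    simp only [below, Bool.and_eq_true, decide_eq_true_eq]
    constructor
    · rintro ⟨⟨h1, h2⟩, h3⟩
      exact ⟨q1, q2, q3, p1, p2, p3, rfl, rfl, h1, h2, h3⟩
    · rintro ⟨a1, a2, a3, b1, b2, b3, hq, hp, h1, h2, h3⟩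
      injection hq with e1 hq; injection hq with e2 hq; injection hq with e3 _
      injection hp with f1 hp; injection hp with f2 hp; injection hp with f3 _
      subst e1; subst e2; subst e3; subst f1; subst f2; subst f3
      exact ⟨⟨h1, h2⟩, h3⟩
  | [], p => simp [below]
  | [_], p => simp [below]
  | [_, _], p => simp [below]
  | _ :: _ :: _ :: _ :: _, p => simp [below]
  | [_, _, _], [] => simp [below]
  | [_, _, _], [_] => simp [below]
  | [_, _, _], [_, _] => simp [below]
  | [_, _, _], _ :: _ :: _ :: _ :: _ => simp [below]

theorem below_trans (a b c : List Int) (h1 : below a b = true) (h2 : below b c = true) :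
    below a c = true := by
  rw [below_iff] at h1 h2 ⊢
  obtain ⟨a1, a2, a3, b1, b2, b3, ha, hb, x1, x2, x3⟩ := h1
  obtain ⟨b1', b2', b3', c1, c2, c3, hb', hc, y1, y2, y3⟩ := h2
  rw [hb] at hb'
  injection hb' with e1 hb'; injection hb' with e2 hb'; injection hb' with e3 _
  subst e1; subst e2; subst e3
  exact ⟨a1, a2, a3, c1, c2, c3, ha, hc, by omega, by omega, by omega⟩

-- generic head characterization of lexicographic order
theorem lex_cons_iff_gen {α : Type} (r : α → α → Prop) (x y : α) (l1 l2 : List α) :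
    List.Lex r (x :: l1) (y :: l2) ↔ r x y ∨ (x = y ∧ List.Lex r l1 l2) := by
  constructor
  · intro h
    cases h with
    | rel h => exact Or.inl h
    | cons h => exact Or.inr ⟨rfl, h⟩
  · rintro (h | ⟨rfl, h⟩)
    · exact List.Lex.rel h
    · exact List.Lex.cons h

-- a lexicographically smaller point is never componentwise above
theorem below_false_of_lt (a b : List Int) (hlt : List.Lex (· < ·) a b) : below b a = false := by
  by_contra h
  have h' : below b a = true := by simpa using h
  rw [below_iff] at h'
  obtain ⟨b1, b2, b3, a1, a2, a3, hb, ha, x1, x2, x3⟩ := h'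
  subst hb; subst ha
  rw [lex_cons_iff_gen] at hlt
  rcases hlt with h1 | ⟨rfl, hlt⟩
  · omega
  · rw [lex_cons_iff_gen] at hlt
    rcases hlt with h2 | ⟨rfl, hlt⟩
    · omega
    · rw [lex_cons_iff_gen] at hlt
      rcases hlt with h3 | ⟨rfl, hlt⟩
      · omega
      · cases hlt

-- the frontier sweep marks exactly the points rel-dominated by some other point of the list
theorem marked_go (rel : List Int → List Int → Bool)
    (htrans : ∀ a b c, rel a b = true → rel b c = true → rel a c = true)
    (xs seen : List (List Int)) (m : PySem.Set (List Int)) (f : List (List Int))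
    (hnd : (seen ++ xs).Nodup)
    (hord : (seen ++ xs).Pairwise (fun a b => rel b a = false))
    (hI0 : ∀ s, s ∈ m ↔ (s ∈ seen ∧ ∃ q ∈ seen, q ≠ s ∧ rel q s = true))
    (hI1 : ∀ q ∈ f, q ∈ seen)
    (hI2 : ∀ s ∈ seen, s ∈ f ∨ ∃ q ∈ f, q ≠ s ∧ rel q s = true) :
    ∀ s, s ∈ (xs.foldl (pvStep rel) (m, f)).1 ↔
      (s ∈ seen ++ xs ∧ ∃ q ∈ seen ++ xs, q ≠ s ∧ rel q s = true) := by
  induction xs generalizing seen m f with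
  | nil =>
    intro s
    simpa using hI0 s
  | cons p xs ih =>
    have happ : seen ++ p :: xs = (seen ++ [p]) ++ xs := List.append_cons seen p xs
    have hnd' : ((seen ++ [p]) ++ xs).Nodup := by rw [← happ]; exact hnd
    have hord' : ((seen ++ [p]) ++ xs).Pairwise (fun a b => rel b a = false) := by
      rw [← happ]; exact hord
    have hpseen : p ∉ seen := by
      have hdis := (List.nodup_append.mp hnd).2.2
      intro hp; exact hdis p hp p (by simp) rfl
    have hseenp : ∀ s ∈ seen, rel p s = false := by
      intro s hs
      exact (List.pairwise_append.mp hord).2.2 s hs p (by simp)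
    intro s
    rw [List.foldl_cons]
    by_cases hany : (f.any (fun q => rel q p)) = true
    · have hstep : pvStep rel (m, f) p = (PySem.Set.add m p, f) := by
        simp [pvStep, hany]
      rw [hstep, happ]
      refine ih (seen ++ [p]) (PySem.Set.add m p) f hnd' hord' ?_ ?_ ?_ s
      · -- hI0'
        intro t
        rw [PySem.Set.mem_add]
        obtain ⟨q0, hq0f, hq0rel⟩ := List.any_eq_true.mp hany
        have hq0seen : q0 ∈ seen := hI1 q0 hq0f
        constructor
        · rintro (ht | rfl)
          · obtain ⟨hts, q, hq, hqt, hrel⟩ := (hI0 t).mp ht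
            exact ⟨by simp [hts], q, by simp [hq], hqt, hrel⟩
          · refine ⟨by simp, q0, by simp [hq0seen], ?_, hq0rel⟩
            intro h; rw [h] at hq0seen; exact hpseen hq0seen
        · rintro ⟨hts, q, hq, hqt, hrel⟩
          rcases List.mem_append.mp hts with hts | hts
          · -- t ∈ seen: q = p is impossible, so the old characterization applies
            left
            rcases List.mem_append.mp hq with hq | hq
            · exact (hI0 t).mpr ⟨hts, q, hq, hqt, hrel⟩
            · exfalso
              have : q = p := by simpa using hq
              rw [this] at hrel
              rw [hseenp t hts] at hrel; exact Bool.false_ne_true hrel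
          · right; simpa using hts
      · exact fun q hq => by simp [hI1 q hq]
      · intro t ht
        rcases List.mem_append.mp ht with ht | ht
        · exact hI2 t ht
        · have htp : t = p := by simpa using ht
          rw [htp]
          obtain ⟨q0, hq0f, hq0rel⟩ := List.any_eq_true.mp hany
          refine Or.inr ⟨q0, hq0f, ?_, hq0rel⟩
          intro h; rw [h] at hq0f; exact hpseen (hI1 p hq0f)
    · have hany' : (f.any (fun q => rel q p)) = false := by simpa using hany
      have hstep : pvStep rel (m, f) p = (m, f ++ [p]) := by
        simp [pvStep, hany']
      rw [hstep, happ]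
      refine ih (seen ++ [p]) m (f ++ [p]) hnd' hord' ?_ ?_ ?_ s
      · -- hI0': m is unchanged and p is provably unmarked
        intro t
        rw [hI0 t]
        constructor
        · rintro ⟨hts, q, hq, hqt, hrel⟩
          exact ⟨by simp [hts], q, by simp [hq], hqt, hrel⟩
        · rintro ⟨hts, q, hq, hqt, hrel⟩
          rcases List.mem_append.mp hts with hts | hts
          · rcases List.mem_append.mp hq with hq | hq
            · exact ⟨hts, q, hq, hqt, hrel⟩
            · exfalso
              have : q = p := by simpa using hq
              rw [this] at hrel
              rw [hseenp t hts] at hrel; exact Bool.false_ne_true hrel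
          · -- t = p: a rel-dominator of p would have made the frontier test fire
            exfalso
            have htp : t = p := by simpa using hts
            subst htp
            have hqseen : q ∈ seen := by
              rcases List.mem_append.mp hq with hq | hq
              · exact hq
              · exact absurd (by simpa using hq) hqt
            rcases hI2 q hqseen with hqf | ⟨r, hrf, hrq, hrrel⟩
            · have : f.any (fun q' => rel q' t) = true :=
                List.any_eq_true.mpr ⟨q, hqf, hrel⟩
              rw [hany'] at this; exact Bool.false_ne_true this
            · have : f.any (fun q' => rel q' t) = true :=
                List.any_eq_true.mpr ⟨r, hrf, htrans r q t hrrel hrel⟩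
              rw [hany'] at this; exact Bool.false_ne_true this
      · intro q hq
        rcases List.mem_append.mp hq with hq | hq
        · simp [hI1 q hq]
        · simp [by simpa using hq]
      · intro t ht
        rcases List.mem_append.mp ht with ht | ht
        · rcases hI2 t ht with htf | ⟨q, hqf, hqt, hrel⟩
          · exact Or.inl (by simp [htf])
          · exact Or.inr ⟨q, by simp [hqf], hqt, hrel⟩
        · exact Or.inl (by simp [show t = p from by simpa using ht])

theorem marked_char (rel : List Int → List Int → Bool)
    (htrans : ∀ a b c, rel a b = true → rel b c = true → rel a c = true)
    (pts : List (List Int)) (hnd : pts.Nodup)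
    (hord : pts.Pairwise (fun a b => rel b a = false)) (s : List Int) :
    s ∈ pvMarked pts rel ↔ (s ∈ pts ∧ ∃ q ∈ pts, q ≠ s ∧ rel q s = true) := by
  have := marked_go rel htrans pts [] PySem.Set.empty []
    (by simpa using hnd) (by simpa using hord)
    (fun t => by simp [PySem.Set.empty]) (fun q hq => by simp at hq)
    (fun t ht => by simp at ht) s
  simpa [pvMarked] using this

-- Set.contains is list membership (Int lists have lawful BEq)
theorem contains_iff (s : PySem.Set (List Int)) (x : List Int) :
    PySem.Set.contains s x = true ↔ x ∈ s := by
  simp [PySem.Set.contains]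

-- proof-side twin of is_niepor_alt's body with the LinearOrder instances (same comparisons)
def pvAltL (b : List (Int × List Int)) : List (Int × List Int) :=
  let pts := @PySem.List.sorted (List Int) (List Int) List.instLinearOrder.toLT
      List.instLinearOrder.toDecidableLT (PySem.Set.ofList (b.map Prod.snd)) (fun x => x) false
  let hasBelow := pvMarked pts below
  let hasAbove := pvMarked pts.reverse (fun q p => below p q)
  b.filter (fun kv => !(PySem.Set.contains hasBelow kv.2) && !(PySem.Set.contains hasAbove kv.2))

-- the two LT instances on Int lists decide the same (lexicographic) order, so sorted agrees
theorem sorted_inst_eq (xs : List (List Int)) :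
    PySem.List.sorted xs (fun x => x) false =
      @PySem.List.sorted (List Int) (List Int) List.instLinearOrder.toLT
        List.instLinearOrder.toDecidableLT xs (fun x => x) false := by
  rw [PySem.List.sorted_eq_foldl_insertBy,
    @PySem.List.sorted_eq_foldl_insertBy (List Int) (List Int) List.instLinearOrder.toLT
      List.instLinearOrder.toDecidableLT xs (fun x => x)]
  congr 1
  funext acc x
  congr 1
  funext a b
  exact decide_eq_decide.mpr (List.lt_iff_lex_lt a b)

theorem alt_instances (b : List (Int × List Int)) : is_niepor_alt b = pvAltL b := by
  simp only [is_niepor_alt, pvAltL, sorted_inst_eq]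

-- B computes the same filter as A
theorem alt_eq (b : List (Int × List Int)) :
    is_niepor_alt b = b.filter (fun kv => !(pvAnyCmp (b.map Prod.snd) kv.2)) := by
  rw [alt_instances]
  show pvAltL b = _
  have hperm := @PySem.List.sorted_perm (List Int) (List Int) List.instLinearOrder.toLT
      List.instLinearOrder.toDecidableLT (PySem.Set.ofList (b.map Prod.snd)) (fun x => x) false
  set pts := @PySem.List.sorted (List Int) (List Int) List.instLinearOrder.toLT
      List.instLinearOrder.toDecidableLT (PySem.Set.ofList (b.map Prod.snd)) (fun x => x) false
      with hpts
  have hmempts : ∀ x, x ∈ pts ↔ x ∈ b.map Prod.snd := by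
    intro x
    rw [hperm.mem_iff, PySem.Set.mem_ofList]
  have hnd : pts.Nodup := hperm.symm.nodup (PySem.Set.nodup_ofList (b.map Prod.snd))
  have hplt : pts.Pairwise (fun a b => List.Lex (· < ·) a b) :=
    PySem.List.sorted_ofList_pairwise_lt (b.map Prod.snd)
  have hordB : pts.Pairwise (fun a b => below b a = false) :=
    hplt.imp (fun h => below_false_of_lt _ _ h)
  have hordA : pts.reverse.Pairwise (fun a b => below a b = false) :=
    List.pairwise_reverse.mpr (hplt.imp (fun h => below_false_of_lt _ _ h))
  have hcharB := marked_char below below_trans pts hnd hordB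
  have hcharA := marked_char (fun q p => below p q)
      (fun a b c h1 h2 => below_trans c b a h2 h1) pts.reverse
      (by simpa using hnd) hordA
  show b.filter _ = b.filter _
  refine List.filter_congr ?_
  intro kv hkv
  have hv : kv.2 ∈ b.map Prod.snd := List.mem_map.mpr ⟨kv, hkv, rfl⟩
  have hvpts : kv.2 ∈ pts := (hmempts kv.2).mpr hv
  have e1 : PySem.Set.contains (pvMarked pts below) kv.2 =
      (b.map Prod.snd).any (fun w => w ≠ kv.2 && below w kv.2) := by
    rw [Bool.eq_iff_iff, contains_iff, hcharB kv.2, List.any_eq_true]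
    constructor
    · rintro ⟨_, q, hq, hqs, hrel⟩
      exact ⟨q, (hmempts q).mp hq, by simp [hqs, hrel]⟩
    · rintro ⟨q, hq, hrel⟩
      obtain ⟨hq1, hq2⟩ : q ≠ kv.2 ∧ below q kv.2 = true := by simpa using hrel
      exact ⟨hvpts, q, (hmempts q).mpr hq, hq1, hq2⟩
  have e2 : PySem.Set.contains (pvMarked pts.reverse (fun q p => below p q)) kv.2 =
      (b.map Prod.snd).any (fun w => w ≠ kv.2 && below kv.2 w) := by
    rw [Bool.eq_iff_iff, contains_iff, hcharA kv.2, List.any_eq_true]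
    constructor
    · rintro ⟨_, q, hq, hqs, hrel⟩
      refine ⟨q, (hmempts q).mp (List.mem_reverse.mp hq), by simp [hqs, hrel]⟩
    · rintro ⟨q, hq, hrel⟩
      obtain ⟨hq1, hq2⟩ : q ≠ kv.2 ∧ below kv.2 q = true := by simpa using hrel
      exact ⟨List.mem_reverse.mpr hvpts, q, List.mem_reverse.mpr ((hmempts q).mpr hq), hq1, hq2⟩
  show (!(PySem.Set.contains (pvMarked pts below) kv.2) &&
        !(PySem.Set.contains (pvMarked pts.reverse (fun q p => below p q)) kv.2)) =
       !(pvAnyCmp (b.map Prod.snd) kv.2)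
  rw [e1, e2]
  rw [Bool.eq_iff_iff]
  simp only [Bool.and_eq_true, Bool.not_eq_true', List.any_eq_false, pvAnyCmp, pvCmp]
  constructor
  · rintro ⟨h1, h2⟩ w hw
    have := h1 w hw
    have := h2 w hw
    cases hww : (w == kv.2) <;> simp_all
  · intro h
    constructor <;> intro w hw <;> have := h w hw <;>
      cases hww : (w == kv.2) <;> simp_all

-- ===== VERDICT (by name: the statement is the Claim_ definition above) =====
theorem is_niepor_spec : Claim_equal_is_niepor := by
  intro b _ hpre
  obtain ⟨hnd, hP⟩ := hpre
  unfold Spec_is_niepor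
  rw [a_eq b hnd hP, alt_eq b]
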